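-- pv_equiv track=rewrite | github.com/csingh/interview_prep | geeksforgeeks/easy/remove_ac_and_b.py | remove_things
-- ===== SOURCE A (Python) =====
-- def remove_things(string):
--     string = list(string)
--     num_spaces = 0
--     for i in range(len(string)):
--         if string[i] == "b":
--             num_spaces += 1
--             string[i] = ""
--         elif i > 0 and string[i-1] == "a" and string[i] == "c":
--             num_spaces += 2
--             string[i-1] = ""
--             string[i] = ""
--         elif string[i] == "a" and i+1 < len(string) and string[i+1] == "c":
--             pass
--         elif num_spaces > 0:
--             string[i-num_spaces] = string[i]
--             string[i] = ""
--
--     return "".join(string)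
-- ===== SOURCE B (Python) =====
-- def remove_things(string):
--     n = len(string)
--     out = []
--     i = 0
--     while i < n:
--         c = string[i]
--         if c == 'b':
--             i += 1
--         elif c == 'a' and i + 1 < n and string[i + 1] == 'c':
--             i += 2
--         else:
--             out.append(c)
--             i += 1
--     return ''.join(out)
-- ===== Notes on version B (the rewrite author's own statement) =====
-- stated objective: simpler
-- what changed: B builds a fresh output with a one-character lookahead (skip 'b', skip an adjacent 'ac' pair, else emit) instead of A's in-place cell blanking with a num_spaces shift-compaction offset and backward post-mutation neighbour check.
import Mathlib
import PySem

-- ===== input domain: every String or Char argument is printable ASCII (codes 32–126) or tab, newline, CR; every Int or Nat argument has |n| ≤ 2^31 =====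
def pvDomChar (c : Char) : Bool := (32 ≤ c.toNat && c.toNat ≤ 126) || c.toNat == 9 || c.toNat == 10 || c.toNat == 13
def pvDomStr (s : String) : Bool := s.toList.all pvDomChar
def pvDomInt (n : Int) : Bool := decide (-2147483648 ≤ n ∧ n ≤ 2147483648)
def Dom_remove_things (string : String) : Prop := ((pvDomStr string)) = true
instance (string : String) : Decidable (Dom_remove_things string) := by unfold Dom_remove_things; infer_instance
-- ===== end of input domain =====

-- B removes the 'b's and the originally-adjacent "ac" pairs by building a fresh output list with
-- one-character lookahead, instead of A's in-place blanking plus num_spaces shift-compaction; objective: simpler.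

-- ===== PORT A =====
-- Python list assignment s[i] = v (a negative index wraps around); in this program every index used is provably in range.
def pySetCell (s : List String) (i : Int) (v : String) : List String :=
  if i < 0 then s.set ((s.length : Int) + i).toNat v else s.set i.toNat v

-- one iteration of A's `for i in range(len(string))` loop over the state (string, num_spaces).
-- Reads use PySem.List.pyGetD with default "": every index read here is provably in range, so the default is never returned.
def stepA (st : List String × Int) (i : Int) : List String × Int :=
  if PySem.List.pyGetD st.1 i "" = "b" then
    (pySetCell st.1 i "", st.2 + 1)
  else if 0 < i ∧ PySem.List.pyGetD st.1 (i - 1) "" = "a" ∧ PySem.List.pyGetD st.1 i "" = "c" then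
    (pySetCell (pySetCell st.1 (i - 1) "") i "", st.2 + 2)
  else if PySem.List.pyGetD st.1 i "" = "a" ∧ i + 1 < (st.1.length : Int) ∧ PySem.List.pyGetD st.1 (i + 1) "" = "c" then
    st
  else if 0 < st.2 then
    (pySetCell (pySetCell st.1 (i - st.2) (PySem.List.pyGetD st.1 i "")) i "", st.2)
  else st

def remove_things (string : String) : String :=
  let s0 : List String := string.toList.map (fun c => String.ofList [c])   -- string = list(string)
  PySem.Str.join "" ((PySem.List.pyRange 0 (s0.length : Int) 1).foldl stepA (s0, 0)).1   -- "".join(string)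

-- ===== PORT B =====
-- the while-loop of Source B: skip a 'b' (advance 1), skip an adjacent "ac" pair (advance 2), else emit the char.
def goRT : List Char → List Char
  | [] => []
  | [c] => if c = 'b' then [] else [c]
  | c :: d :: rest =>
    if c = 'b' then goRT (d :: rest)
    else if c = 'a' ∧ d = 'c' then goRT rest
    else c :: goRT (d :: rest)

def remove_things_alt (string : String) : String := String.ofList (goRT string.toList)   -- ''.join(out)

-- ===== PRECONDITION & SPEC =====
def Spec_remove_things (string : String) (out : String) : Prop := out = remove_things_alt string
instance (string : String) (out : String) : Decidable (Spec_remove_things string out) := by unfold Spec_remove_things; infer_instance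

-- ===== CLAIM (what is proved, stated in full; the proofs are below) =====
def Claim_equal_remove_things : Prop := ∀ (string : String), Dom_remove_things string → Spec_remove_things string (remove_things string)

-- ===== LEMMAS AND PROOFS =====

-- a list cell of A holding the single character c
def cellS (c : Char) : String := String.ofList [c]

-- A "pending pair" at step i: the previous original char is 'a' and the current one is 'c';
-- at step i-1 A's pass-branch fired, and at step i branch 2 will remove both cells.
def pendRT (t : List Char) (i : Nat) : Prop :=
  0 < i ∧ i < t.length ∧ t.getD (i - 1) ' ' = 'a' ∧ t.getD i ' ' = 'c'

-- Loop invariant of A at the start of iteration i: the processed prefix is goRT of the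
-- original prefix, compacted to the front, followed by num_spaces blank cells (with the
-- pending 'a' still in place in the pending case); the suffix is untouched.
def InvP (t : List Char) (i : Nat) (st : List String × Int) : Prop :=
  (pendRT t i → ∃ k : Nat, st.2 = (k : Int) ∧ (goRT (t.take (i - 1))).length + k + 1 = i ∧
      st.1 = (goRT (t.take (i - 1))).map cellS ++ List.replicate k "" ++ cellS 'a' :: (t.drop i).map cellS)
  ∧ (¬ pendRT t i → ∃ k : Nat, st.2 = (k : Int) ∧ (goRT (t.take i)).length + k = i ∧
      st.1 = (goRT (t.take i)).map cellS ++ List.replicate k "" ++ (t.drop i).map cellS)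

lemma goRT_sublist : ∀ l : List Char, (goRT l).Sublist l := by
  intro l
  induction l using goRT.induct with
  | case1 => simp [goRT]
  | case2 => simp [goRT]
  | case3 c h => simp [goRT, h]
  | case4 d rest ih => simpa [goRT] using ih.cons _
  | case5 c d rest h1 h2 ih =>
      simp only [goRT, h2]
      exact ih.trans ((List.sublist_cons_self _ _).trans (List.sublist_cons_self _ _))
  | case6 c d rest h1 h2 ih => simp only [goRT, h1, h2, if_false]; exact ih.cons₂ _

lemma goRT_append_ac (zs : List Char) : goRT (zs ++ ['a', 'c']) = goRT zs := by
  induction zs using goRT.induct with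
  | case1 => simp [goRT]
  | case2 => simp [goRT]
  | case3 c h => simp [goRT, h]
  | case4 d rest ih => simpa [goRT] using ih
  | case5 c d rest h1 h2 ih => simp [goRT, h2, ih]
  | case6 c d rest h1 h2 ih =>
      simp only [List.cons_append] at ih ⊢; simp [goRT, h1, h2, ih]

lemma goRT_append_b (zs : List Char) : goRT (zs ++ ['b']) = goRT zs := by
  induction zs using goRT.induct with
  | case1 => simp [goRT]
  | case2 => simp [goRT]
  | case3 c h => simp [goRT, h]
  | case4 d rest ih => simpa [goRT] using ih
  | case5 c d rest h1 h2 ih => simp [goRT, h2, ih]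
  | case6 c d rest h1 h2 ih =>
      simp only [List.cons_append] at ih ⊢; simp [goRT, h1, h2, ih]

lemma goRT_append_keep (zs : List Char) (x : Char) (hb : x ≠ 'b')
    (hc : ¬ (x = 'c' ∧ zs.getLast? = some 'a')) : goRT (zs ++ [x]) = goRT zs ++ [x] := by
  induction zs using goRT.induct with
  | case1 => simp [goRT, hb]
  | case2 => simp [goRT, hb]
  | case3 c h =>
      have h2 : ¬ (c = 'a' ∧ x = 'c') := by
        intro ⟨ha, hx⟩; exact hc ⟨hx, by simp [ha]⟩
      simp [goRT, h, hb, h2]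
  | case4 d rest ih =>
      have := ih (by simpa using hc)
      simpa [goRT] using this
  | case5 c d rest h1 h2 ih =>
      have hrest : goRT (rest ++ [x]) = goRT rest ++ [x] := by
        cases rest with
        | nil => simp [goRT, hb]
        | cons r rs => exact ih (by simpa using hc)
      simp [goRT, h2, hrest]
  | case6 c d rest h1 h2 ih =>
      have h3 := ih (by simpa using hc)
      simp only [List.cons_append] at h3 ⊢
      simp [goRT, h1, h2, h3]

lemma getD_at_len (P : List String) (x : String) (C : List String) : (P ++ x :: C).getD P.length "" = x := by
  induction P <;> simp_all [List.getD]

lemma set_at_len (P : List String) (x v : String) (C : List String) : (P ++ x :: C).set P.length v = P ++ v :: C := by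
  induction P <;> simp_all

lemma getD_shift (P C : List String) (m : Nat) : (P ++ C).getD (P.length + m) "" = C.getD m "" := by
  induction P <;> simp_all [Nat.succ_add, List.getD]

lemma pyGetD_nat (s : List String) (j : Nat) : PySem.List.pyGetD s ((j:Nat):Int) "" = s.getD j "" := by
  simp [pysem]

lemma pySetCell_nat (s : List String) (j : Nat) (v : String) : pySetCell s ((j:Nat):Int) v = s.set j v := by
  unfold pySetCell
  rw [if_neg (by omega), Int.toNat_natCast]

lemma cellS_inj (c d : Char) : cellS c = cellS d ↔ c = d := by
  simp [cellS, String.ofList_inj]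

lemma cellS_a : cellS 'a' = "a" := by simp [cellS]
lemma cellS_b : cellS 'b' = "b" := by simp [cellS]
lemma cellS_c : cellS 'c' = "c" := by simp [cellS]

lemma getD_map_cellS (l : List Char) (j : Nat) (h : j < l.length) :
    (l.map cellS).getD j "" = cellS (l.getD j ' ') := by
  rw [List.getD_eq_getElem _ _ (by simpa), List.getElem_map, List.getD_eq_getElem _ _ h]

set_option maxHeartbeats 1000000 in
lemma step_inv (t : List Char) (i : Nat) (hi : i < t.length) (st : List String × Int)
    (h : InvP t i st) : InvP t (i + 1) (stepA st (i : Int)) := by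
  have hdropi : t.drop i = t.getD i ' ' :: t.drop (i+1) := by
    rw [List.getD_eq_getElem t ' ' hi]; exact List.drop_eq_getElem_cons hi
  have htakei : t.take (i+1) = t.take i ++ [t.getD i ' '] := by
    rw [List.getD_eq_getElem t ' ' hi]; exact List.take_succ_eq_append_getElem hi
  set x := t.getD i ' ' with hx
  by_cases hp : pendRT t i
  · -- pending: branch 2 fires, removing the original "ac" pair
    obtain ⟨k, hns, hlen, hs⟩ := h.1 hp
    obtain ⟨hi0, hin, ha, hc⟩ := hp
    have hxc : x = 'c' := hc
    set g := goRT (t.take (i-1)) with hg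
    rw [hdropi, hxc] at hs
    simp only [List.map_cons] at hs
    have hP1len : (g.map cellS ++ List.replicate k "").length = i - 1 := by simp; omega
    have e_im1 : PySem.List.pyGetD st.1 ((i:Int) - 1) "" = "a" := by
      rw [show ((i:Int) - 1) = ((i-1 : Nat) : Int) from by omega, pyGetD_nat, hs,
        show (i - 1) = (g.map cellS ++ List.replicate k "").length from hP1len.symm,
        getD_at_len, cellS_a]
    have e_i : PySem.List.pyGetD st.1 (i:Int) "" = "c" := by
      rw [pyGetD_nat, hs,
        show (g.map cellS ++ List.replicate k "" ++ cellS 'a' :: cellS 'c' :: (t.drop (i+1)).map cellS)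
          = (g.map cellS ++ List.replicate k "" ++ [cellS 'a']) ++ cellS 'c' :: (t.drop (i+1)).map cellS
          from by simp,
        show i = (g.map cellS ++ List.replicate k "" ++ [cellS 'a']).length from by simp; omega,
        getD_at_len, cellS_c]
    have htk : t.take (i+1) = t.take (i-1) ++ ['a', 'c'] := by
      rw [htakei, hxc,
        show t.take i = t.take (i-1) ++ [t.getD (i-1) ' '] from by
          rw [List.getD_eq_getElem t ' ' (by omega : i - 1 < t.length)]
          have h2 := List.take_succ_eq_append_getElem (l := t) (i := i - 1) (by omega)
          rwa [show (i-1)+1 = i from by omega] at h2,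
        ha]
      simp
    simp only [stepA]
    rw [if_neg (by rw [e_i]; decide), if_pos ⟨by exact_mod_cast hi0, e_im1, e_i⟩]
    constructor
    · intro hp'
      exfalso
      have h2 : t.getD ((i+1) - 1) ' ' = 'a' := hp'.2.2.1
      simp only [Nat.add_sub_cancel] at h2
      rw [← hx, hxc] at h2; exact absurd h2 (by decide)
    · intro _
      refine ⟨k + 2, by push_cast [hns]; ring, ?_, ?_⟩
      · rw [htk, goRT_append_ac, ← hg]; omega
      · rw [htk, goRT_append_ac, ← hg]
        have hinner : pySetCell st.1 ((i:Int) - 1) "" =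
            g.map cellS ++ List.replicate k "" ++ "" :: cellS 'c' :: (t.drop (i+1)).map cellS := by
          rw [show ((i:Int) - 1) = ((i-1 : Nat) : Int) from by omega, pySetCell_nat, hs,
            show (i - 1) = (g.map cellS ++ List.replicate k "").length from hP1len.symm,
            set_at_len]
        have houter : pySetCell (g.map cellS ++ List.replicate k "" ++ "" :: cellS 'c' :: (t.drop (i+1)).map cellS) (i:Int) "" =
            g.map cellS ++ List.replicate k "" ++ "" :: "" :: (t.drop (i+1)).map cellS := by
          rw [pySetCell_nat,
            show (g.map cellS ++ List.replicate k "" ++ "" :: cellS 'c' :: (t.drop (i+1)).map cellS)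
              = (g.map cellS ++ List.replicate k "" ++ [""]) ++ cellS 'c' :: (t.drop (i+1)).map cellS
              from by simp,
            show i = (g.map cellS ++ List.replicate k "" ++ [""]).length from by simp; omega,
            set_at_len]
          simp
        show pySetCell (pySetCell st.1 ((i:Int) - 1) "") (i:Int) "" = _
        rw [hinner, houter, List.replicate_add]
        simp
  · -- non-pending
    obtain ⟨k, hns, hlen, hs⟩ := h.2 hp
    set g := goRT (t.take i) with hg
    rw [hdropi] at hs
    simp only [List.map_cons] at hs
    have hPlen : (g.map cellS ++ List.replicate k "").length = i := by simp; omega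
    have e_i : PySem.List.pyGetD st.1 (i:Int) "" = cellS x := by
      rw [pyGetD_nat, hs,
        show i = (g.map cellS ++ List.replicate k "").length from hPlen.symm, getD_at_len]
    have hslen : st.1.length = t.length := by
      rw [hs]
      simp only [List.length_append, List.length_map, List.length_replicate, List.length_cons,
        List.length_drop]
      omega
    -- value at i+1 (when it exists)
    have e_ip1 : i + 1 < t.length → PySem.List.pyGetD st.1 ((i:Int) + 1) "" = cellS (t.getD (i+1) ' ') := by
      intro hin1
      have hdrop1 : t.drop (i+1) = t.getD (i+1) ' ' :: t.drop (i+2) := by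
        rw [List.getD_eq_getElem t ' ' hin1]; exact List.drop_eq_getElem_cons hin1
      rw [show ((i:Int) + 1) = ((i+1 : Nat) : Int) from by omega, pyGetD_nat, hs, hdrop1]
      rw [show (g.map cellS ++ List.replicate k "" ++ cellS x :: (t.getD (i+1) ' ' :: t.drop (i+2)).map cellS)
          = (g.map cellS ++ List.replicate k "" ++ [cellS x]) ++ cellS (t.getD (i+1) ' ') :: (t.drop (i+2)).map cellS
          from by simp,
        show i + 1 = (g.map cellS ++ List.replicate k "" ++ [cellS x]).length from by simp; omega,
        getD_at_len]
    -- branch-3 condition vs pendRT (i+1)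
    have hcond3_iff : (PySem.List.pyGetD st.1 (i:Int) "" = "a" ∧ (i:Int) + 1 < (st.1.length : Int) ∧
        PySem.List.pyGetD st.1 ((i:Int) + 1) "" = "c") ↔ pendRT t (i+1) := by
      constructor
      · rintro ⟨h1, h2, h3⟩
        have hxa : x = 'a' := by rw [e_i, ← cellS_a, cellS_inj] at h1; exact h1
        have hin1 : i + 1 < t.length := by rw [hslen] at h2; exact_mod_cast h2
        have h4 := e_ip1 hin1
        rw [h4, ← cellS_c, cellS_inj] at h3
        refine ⟨by omega, hin1, ?_, h3⟩
        simp only [Nat.add_sub_cancel]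
        rw [← hx]; exact hxa
      · rintro ⟨_, hin1, h3, h4⟩
        simp only [Nat.add_sub_cancel] at h3
        refine ⟨by rw [e_i, hx, h3, cellS_a], ?_, ?_⟩
        · rw [hslen]; exact_mod_cast hin1
        · rw [e_ip1 hin1, h4, cellS_c]
    by_cases hbx : x = 'b'
    · -- branch 1 fires
      have e_ib : PySem.List.pyGetD st.1 (i:Int) "" = "b" := by rw [e_i, hbx, cellS_b]
      simp only [stepA, e_ib]
      constructor
      · intro hp'
        exfalso
        have h2 : t.getD ((i+1) - 1) ' ' = 'a' := hp'.2.2.1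
        simp only [Nat.add_sub_cancel] at h2
        rw [← hx, hbx] at h2; exact absurd h2 (by decide)
      · intro _
        refine ⟨k + 1, by push_cast [hns]; ring, ?_, ?_⟩
        · rw [htakei, hbx, goRT_append_b, ← hg]; omega
        · rw [htakei, hbx, goRT_append_b, ← hg, pySetCell_nat, hs,
            show (g.map cellS ++ List.replicate k "" ++ cellS x :: (t.drop (i+1)).map cellS)
              = (g.map cellS ++ List.replicate k "") ++ cellS x :: (t.drop (i+1)).map cellS
              from by simp,
            show i = (g.map cellS ++ List.replicate k "").length from hPlen.symm, set_at_len,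
            List.replicate_succ' (n := k)]
          simp
    · -- branches 3/4/5; branch 2 cannot fire
      have hb_false : ¬ (PySem.List.pyGetD st.1 (i:Int) "" = "b") := by
        rw [e_i, ← cellS_b]
        simpa [cellS_inj] using hbx
      have h2_false : ¬ (0 < (i:Int) ∧ PySem.List.pyGetD st.1 ((i:Int) - 1) "" = "a" ∧
          PySem.List.pyGetD st.1 (i:Int) "" = "c") := by
        rintro ⟨hi0, ham1, hci⟩
        have hi0' : 0 < i := by exact_mod_cast hi0
        have hxc : x = 'c' := by rw [e_i, ← cellS_c, cellS_inj] at hci; exact hci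
        rcases Nat.eq_zero_or_pos k with hk | hk
        · -- k = 0 : cell i-1 is the last char of g = take i t
          have hgfull : g = t.take i := (goRT_sublist _).eq_of_length (by
            rw [List.length_take_of_le (by omega : i ≤ t.length), ← hg]; omega)
          have : PySem.List.pyGetD st.1 ((i:Int) - 1) "" = cellS (t.getD (i-1) ' ') := by
            rw [show ((i:Int) - 1) = ((i-1 : Nat) : Int) from by omega, pyGetD_nat, hs, hk]
            simp only [List.replicate_zero, List.append_nil]
            have hglen : g.length = i := by
              rw [hgfull, List.length_take_of_le (by omega : i ≤ t.length)]
            rw [List.getD_append _ _ _ _ (by rw [List.length_map, hglen]; omega),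
              getD_map_cellS _ _ (by rw [hglen]; omega),
              hgfull, List.getD_eq_getElem _ _ (by rw [List.length_take_of_le (by omega : i ≤ t.length)]; omega),
              List.getElem_take, ← List.getD_eq_getElem t ' ' (by omega)]
          rw [this, ← cellS_a, cellS_inj] at ham1
          exact hp ⟨hi0', hi, ham1, by rw [← hx]; exact hxc⟩
        · -- k > 0 : cell i-1 is a blank
          have : PySem.List.pyGetD st.1 ((i:Int) - 1) "" = "" := by
            rw [show ((i:Int) - 1) = ((i-1 : Nat) : Int) from by omega, pyGetD_nat, hs,
              List.append_assoc,
              show i - 1 = (g.map cellS).length + (k-1) from by simp; omega, getD_shift,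
              List.getD_append _ _ _ _ (by simp; omega)]
            simp [List.getD_eq_getElem?_getD, Nat.sub_lt hk Nat.one_pos]
          rw [this] at ham1
          exact absurd ham1 (by decide)
      simp only [stepA, if_neg hb_false, if_neg h2_false]
      by_cases h3 : PySem.List.pyGetD st.1 (i:Int) "" = "a" ∧ (i:Int) + 1 < (st.1.length : Int) ∧
          PySem.List.pyGetD st.1 ((i:Int) + 1) "" = "c"
      · -- branch 3: pass, a pending pair forms
        have hp1 : pendRT t (i+1) := hcond3_iff.mp h3
        have hxa : x = 'a' := by
          have := h3.1; rw [e_i, ← cellS_a, cellS_inj] at this; exact this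
        rw [if_pos h3]
        constructor
        · intro _
          refine ⟨k, hns, ?_, ?_⟩
          · simp only [Nat.add_sub_cancel, ← hg]; omega
          · simp only [Nat.add_sub_cancel, ← hg]
            rw [hs, hxa, cellS_a]
        · intro hnp'; exact absurd hp1 hnp'
      · -- branches 4/5: keep the char
        have hnp1 : ¬ pendRT t (i+1) := fun hp1 => h3 (hcond3_iff.mpr hp1)
        have hcnd : ¬ (x = 'c' ∧ (t.take i).getLast? = some 'a') := by
          rintro ⟨hxc, hlast⟩
          rcases Nat.eq_zero_or_pos i with hi0 | hi0
          · rw [hi0] at hlast; simp at hlast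
          · have htk2 : t.take i = t.take (i-1) ++ [t[i-1]'(by omega)] := by
              have h2 := List.take_succ_eq_append_getElem (l := t) (i := i - 1) (by omega)
              rwa [show (i-1)+1 = i from by omega] at h2
            rw [htk2, List.getLast?_concat] at hlast
            have ha : t.getD (i-1) ' ' = 'a' := by
              rw [List.getD_eq_getElem t ' ' (by omega)]
              exact Option.some_injective _ hlast
            exact hp ⟨hi0, hi, ha, by rw [← hx]; exact hxc⟩
        have hkeep : goRT (t.take (i+1)) = g ++ [x] := by
          rw [htakei, goRT_append_keep _ x hbx hcnd, hg]
        rw [if_neg h3]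
        by_cases h4 : 0 < st.2
        · -- branch 4: shift the char left over the blanks
          have hk : 0 < k := by rw [hns] at h4; exact_mod_cast h4
          rw [if_pos h4]
          constructor
          · intro hp'; exact absurd hp' hnp1
          · intro _
            refine ⟨k, hns, ?_, ?_⟩
            · rw [hkeep]; simp; omega
            · have hinner : pySetCell st.1 ((i:Int) - st.2) (PySem.List.pyGetD st.1 (i:Int) "") =
                  g.map cellS ++ cellS x :: (List.replicate (k-1) "" ++ cellS x :: (t.drop (i+1)).map cellS) := by
                rw [hns, show ((i:Int) - (k:Int)) = ((i-k : Nat) : Int) from by omega, pySetCell_nat,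
                  e_i, hs,
                  show List.replicate k ("" : String) = "" :: List.replicate (k-1) "" from by
                    rw [← List.replicate_succ]; congr 1; omega,
                  show (g.map cellS ++ ("" :: List.replicate (k-1) "") ++ cellS x :: (t.drop (i+1)).map cellS)
                    = (g.map cellS) ++ "" :: (List.replicate (k-1) "" ++ cellS x :: (t.drop (i+1)).map cellS)
                    from by simp,
                  show i - k = (g.map cellS).length from by simp; omega,
                  set_at_len]
              have houter : pySetCell (g.map cellS ++ cellS x :: (List.replicate (k-1) "" ++ cellS x :: (t.drop (i+1)).map cellS)) (i:Int) "" =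
                  g.map cellS ++ cellS x :: (List.replicate (k-1) "" ++ "" :: (t.drop (i+1)).map cellS) := by
                rw [pySetCell_nat,
                  show (g.map cellS ++ cellS x :: (List.replicate (k-1) "" ++ cellS x :: (t.drop (i+1)).map cellS))
                    = (g.map cellS ++ cellS x :: List.replicate (k-1) "") ++ cellS x :: (t.drop (i+1)).map cellS
                    from by simp,
                  show i = (g.map cellS ++ cellS x :: List.replicate (k-1) "").length from by simp; omega,
                  set_at_len]
                simp
              rw [hkeep]
              show pySetCell (pySetCell st.1 ((i:Int) - st.2) (PySem.List.pyGetD st.1 (i:Int) "")) (i:Int) "" = _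
              rw [hinner, houter,
                show List.replicate k ("" : String) = List.replicate (k-1) "" ++ [""] from by
                  rw [← List.replicate_succ']; congr 1; omega]
              simp
        · -- branch 5: nothing to do (no blanks yet)
          have hk : k = 0 := by rw [hns] at h4; omega
          rw [if_neg h4]
          constructor
          · intro hp'; exact absurd hp' hnp1
          · intro _
            refine ⟨0, by rw [hns, hk], ?_, ?_⟩
            · rw [hkeep]; simp; omega
            · rw [hkeep, hs, hk]
              simp

lemma fold_inv (t : List Char) (i : Nat) (hi : i ≤ t.length) :
    InvP t i (((List.range i).map (fun (j : Nat) => (j : Int))).foldl stepA (t.map cellS, 0)) := by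
  induction i with
  | zero =>
      constructor
      · intro hp; exact absurd hp.1 (by omega)
      · intro _; exact ⟨0, by simp, by simp [goRT], by simp [goRT]⟩
  | succ i ih =>
      rw [List.range_succ, List.map_append, List.foldl_append]
      exact step_inv t i (by omega) _ (ih (by omega))

lemma join_nil_flat : ∀ xs : List (List Char), PySem.Chars.join [] xs = xs.flatten := by
  intro xs
  induction xs with
  | nil => simp [PySem.Chars.join_nil]
  | cons p rest ih =>
      cases rest with
      | nil => simp [PySem.Chars.join_singleton]
      | cons q r => rw [PySem.Chars.join_cons_cons]; simp [ih]

lemma flatten_singletons (l : List Char) : (List.map (fun c => [c]) l).flatten = l := by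
  induction l <;> simp_all

lemma join_cells (l : List Char) (k : Nat) :
    PySem.Str.join "" (l.map cellS ++ List.replicate k "") = String.ofList l := by
  apply String.toList_inj.mp
  rw [PySem.Str.toList_join]
  simp only [List.map_append, List.map_map, List.map_replicate]
  have h1 : String.toList ∘ cellS = fun c => [c] := by
    funext c; exact String.toList_ofList
  simp only [h1, String.toList_empty]
  rw [join_nil_flat]
  simp [flatten_singletons, String.toList_ofList]

-- ===== VERDICT (by name: the statement is the Claim_ definition above) =====
theorem remove_things_spec : Claim_equal_remove_things := by
  intro string _
  unfold Spec_remove_things remove_things remove_things_alt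
  set t := string.toList with ht
  have hlen : (t.map (fun c => String.ofList [c])).length = t.length := by simp
  simp only [hlen]
  rw [PySem.List.pyRange_zero_natCast]
  have hcl : (t.map (fun c => String.ofList [c])) = t.map cellS := by simp [cellS]
  rw [hcl]
  have h := fold_inv t t.length (le_refl _)
  have hnp : ¬ pendRT t t.length := by intro hp; exact absurd hp.2.1 (by omega)
  obtain ⟨k, _, _, hs⟩ := h.2 hnp
  rw [hs]
  simp only [List.take_length, List.drop_length, List.map_nil, List.append_nil]
  exact join_cells (goRT t) k
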